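-- pv_equiv track=rewrite | github.com/AdamZhouSE/pythonHomework | Code/CodeRecords/2924/60693/263179.py | write_essays
-- ===== SOURCE A (Python) =====
-- def write_essays(a,b,n,r,avg):
--     if sum(a)>=avg*n:
--         return 0
--     dis=avg*n-sum(a)
--     res=0
--     for i in range(n):
--         a[i]=r-a[i]
--     dict={}
--     for i in range(n):
--         dict[b[i]]=dict.get(b[i],[])+[a[i]]
--     for x in sorted(dict.keys()):
--         if sum(dict.get(x))>=dis:
--             return res+x*dis
--         dis-=sum(dict.get(x))
--         res+=x*sum(dict.get(x))
-- ===== SOURCE B (Python) =====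
-- def write_essays(a, b, n, r, avg):
--     if sum(a) >= avg * n:
--         return 0
--     need = avg * n - sum(a)
--     for i in range(n):
--         a[i] = r - a[i]
--     pairs = sorted(zip(b[:n], a[:n]), key=lambda t: t[0])
--     costs = [c for c, _ in pairs]
--     # prefix arrays: P[j] = capability of the j cheapest essays, Q[j] = money they cost
--     P = [0]
--     Q = [0]
--     s = 0
--     t = 0
--     for c, v in pairs:
--         s += v
--         t += c * v
--         P.append(s)
--         Q.append(t)
--     # group boundaries: indices where a run of equal cost ends
--     bounds = [i for i in range(1, n + 1) if i == n or costs[i] != costs[i - 1]]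
--     prev = 0
--     for e in bounds:
--         if P[e] >= need:
--             return Q[prev] + costs[prev] * (need - P[prev])
--         prev = e
--     return None
-- ===== Notes on version B (the rewrite author's own statement) =====
-- stated objective: alternative
-- what changed: Replaces A's cost-keyed dict of capability lists (iterated over sorted keys with running dis/res accumulators and three re-summations of each group) by staged passes with no running accumulators: one flat (cost, capability) list sorted once, two prefix-sum arrays P and Q, a computed list of group-boundary indices, and a search that reads the answer off the arrays as Q[prev] + costs[prev]*(need - P[prev]).
import Mathlib
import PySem

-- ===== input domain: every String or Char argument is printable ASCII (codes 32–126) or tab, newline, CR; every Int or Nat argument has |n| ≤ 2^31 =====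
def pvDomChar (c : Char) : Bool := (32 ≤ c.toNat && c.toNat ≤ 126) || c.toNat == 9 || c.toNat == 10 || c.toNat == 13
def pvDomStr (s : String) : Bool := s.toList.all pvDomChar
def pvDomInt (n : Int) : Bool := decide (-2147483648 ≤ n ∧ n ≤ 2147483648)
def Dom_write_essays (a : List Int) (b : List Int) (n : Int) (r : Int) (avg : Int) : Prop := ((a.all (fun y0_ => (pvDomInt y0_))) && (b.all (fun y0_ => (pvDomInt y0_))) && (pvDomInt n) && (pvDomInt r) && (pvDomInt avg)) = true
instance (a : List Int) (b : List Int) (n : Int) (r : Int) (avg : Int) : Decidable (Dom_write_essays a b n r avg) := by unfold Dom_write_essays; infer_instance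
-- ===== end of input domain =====

-- B replaces A's cost-keyed dict of capability lists and its running dis/res accumulators by staged
-- passes: one sorted pair list, two prefix-sum arrays, a computed list of group-boundary indices, and
-- a search that reads the answer off the arrays; both Pythons mutate `a` in place identically, the
-- equivalence proved here is about the return value.

-- ===== PORT A =====
-- for i in range(n): a[i] = r - a[i]   (pyGetD/pySetD defaults are exact inside Pre_, where every index is in range)
def pvMutA (a : List Int) (n r : Int) : List Int :=
  (PySem.List.pyRange 0 n 1).foldl (fun acc i => PySem.List.pySetD acc i (r - PySem.List.pyGetD acc i 0)) a

-- for i in range(n): dict[b[i]] = dict.get(b[i], []) + [a[i]]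
def pvDictA (a' b : List Int) (n : Int) : PySem.Dict Int (List Int) :=
  (PySem.List.pyRange 0 n 1).foldl (fun d i =>
    d.insert (PySem.List.pyGetD b i 0) (d.getD (PySem.List.pyGetD b i 0) [] ++ [PySem.List.pyGetD a' i 0]))
    PySem.Dict.empty

-- for x in sorted(dict.keys()): …  (sum(dict.get(x)) recomputed at each use, as in the source)
def pvLoopA : List Int → PySem.Dict Int (List Int) → Int → Int → Option Int
  | [], _, _, _ => none
  | x :: xs, d, dis, res =>
    if (d.getD x []).sum ≥ dis then some (res + x * dis)
    else pvLoopA xs d (dis - (d.getD x []).sum) (res + x * (d.getD x []).sum)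

def write_essays (a : List Int) (b : List Int) (n : Int) (r : Int) (avg : Int) : Option Int :=
  if a.sum ≥ avg * n then some 0
  else
    let dis := avg * n - a.sum
    let a' := pvMutA a n r
    let d := pvDictA a' b n
    pvLoopA (PySem.List.sorted d.keys (fun x => x) false) d dis 0

-- ===== PORT B =====
-- for i in range(n): a[i] = r - a[i]   (the same in-place loop as in A's source)
def pvMutB (a : List Int) (n r : Int) : List Int :=
  (PySem.List.pyRange 0 n 1).foldl (fun acc i => PySem.List.pySetD acc i (r - PySem.List.pyGetD acc i 0)) a

-- pairs = sorted(zip(b[:n], a[:n]), key=lambda t: t[0])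
def pvPairsB (a' b : List Int) (n : Int) : List (Int × Int) :=
  PySem.List.sorted ((PySem.List.slice b none (some n)).zip (PySem.List.slice a' none (some n)))
    (fun t => t.1) false

-- P = [0]; Q = [0]; s = t = 0; for c, v in pairs: s += v; t += c*v; P.append(s); Q.append(t)
def pvBuildPQ (pairs : List (Int × Int)) : Int × Int × List Int × List Int :=
  pairs.foldl (fun st p =>
      (st.1 + p.2, st.2.1 + p.1 * p.2, st.2.2.1 ++ [st.1 + p.2], st.2.2.2 ++ [st.2.1 + p.1 * p.2]))
    (0, 0, [0], [0])

-- bounds = [i for i in range(1, n+1) if i == n or costs[i] != costs[i-1]]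
-- (pyGetD's default is never the value: the second disjunct is only reached with i < n = len(costs))
def pvBoundsB (costs : List Int) (n : Int) : List Int :=
  (PySem.List.pyRange 1 (n + 1) 1).filter
    (fun i => i == n || !(PySem.List.pyGetD costs i 0 == PySem.List.pyGetD costs (i - 1) 0))

-- prev = 0; for e in bounds: if P[e] >= need: return Q[prev] + costs[prev]*(need - P[prev]); prev = e
def pvLoopB : List Int → Int → List Int → List Int → List Int → Int → Option Int
  | [], _, _, _, _, _ => none
  | e :: es, prev, costs, P, Q, need =>
    if PySem.List.pyGetD P e 0 ≥ need then
      some (PySem.List.pyGetD Q prev 0 +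
        PySem.List.pyGetD costs prev 0 * (need - PySem.List.pyGetD P prev 0))
    else pvLoopB es e costs P Q need

def write_essays_alt (a : List Int) (b : List Int) (n : Int) (r : Int) (avg : Int) : Option Int :=
  if a.sum ≥ avg * n then some 0
  else
    let need := avg * n - a.sum
    let a' := pvMutB a n r
    let pairs := pvPairsB a' b n
    let costs := pairs.map (·.1)
    let st := pvBuildPQ pairs
    pvLoopB (pvBoundsB costs n) 0 costs st.2.2.1 st.2.2.2 need

-- ===== PRECONDITION & SPEC =====
-- Pre_ excludes exactly the inputs on which Python A raises IndexError: the early guard is false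
-- and n exceeds the length of a or of b (the mutation / dict loops then index past the end).
def Pre_write_essays (a : List Int) (b : List Int) (n : Int) (r : Int) (avg : Int) : Prop :=
  a.sum ≥ avg * n ∨ (n ≤ (a.length : Int) ∧ n ≤ (b.length : Int))
instance (a : List Int) (b : List Int) (n : Int) (r : Int) (avg : Int) : Decidable (Pre_write_essays a b n r avg) := by unfold Pre_write_essays; infer_instance

def pvWitness_write_essays : List Int × List Int × Int × Int × Int := ([1, 2], [3, 1], 2, 5, 3)

def Spec_write_essays (a : List Int) (b : List Int) (n : Int) (r : Int) (avg : Int) (out : Option Int) : Prop := out = write_essays_alt a b n r avg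
instance (a : List Int) (b : List Int) (n : Int) (r : Int) (avg : Int) (out : Option Int) : Decidable (Spec_write_essays a b n r avg out) := by unfold Spec_write_essays; infer_instance

-- ===== CLAIM (what is proved, stated in full; the proofs are below) =====
def Claim_equal_write_essays : Prop := ∀ (a : List Int) (b : List Int) (n : Int) (r : Int) (avg : Int), Dom_write_essays a b n r avg → Pre_write_essays a b n r avg → Spec_write_essays a b n r avg (write_essays a b n r avg)

-- ===== LEMMAS AND PROOFS =====

-- proof-side intermediate: A's loop re-expressed as a run-by-run scan of the sorted pair list
def pvRunScan : List (Int × Int) → Int → Int → Option Int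
  | [], _, _ => none
  | (cost, v) :: rest, need, res =>
    let cap := v + ((rest.takeWhile (fun t => t.1 == cost)).map (·.2)).sum
    if cap ≥ need then some (res + cost * need)
    else pvRunScan (rest.dropWhile (fun t => t.1 == cost)) (need - cap) (res + cost * cap)
termination_by l => l.length
decreasing_by
  exact Nat.lt_succ_of_le (List.length_dropWhile_le _ _)

-- the dict loop's lookups: value stored at c = the capabilities of the pairs whose cost is c, in order
lemma pvBuild_getD (l : List (Int × Int)) (d : PySem.Dict Int (List Int)) (c : Int) :
    ((l.foldl (fun d p => d.insert p.1 (d.getD p.1 [] ++ [p.2])) d).getD c []) =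
      d.getD c [] ++ (l.filter (fun p => p.1 == c)).map (·.2) := by
  induction l generalizing d with
  | nil => simp
  | cons p t ih =>
    simp only [List.foldl_cons, ih, List.filter_cons]
    rw [PySem.Dict.getD_insert]
    by_cases h : p.1 = c
    · simp [h]
    · simp [h, Ne.symm h]

-- in a key-sorted list whose keys are all ≥ c, the pairs with key c are the initial run,
-- and everything after that run has key > c
lemma pvRun_filter (c : Int) (l : List (Int × Int))
    (hs : l.Pairwise (fun p q => p.1 ≤ q.1)) (hge : ∀ q ∈ l, c ≤ q.1) :
    l.filter (fun p => p.1 == c) = l.takeWhile (fun p => p.1 == c) ∧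
      ∀ q ∈ l.dropWhile (fun p => p.1 == c), c < q.1 := by
  induction l with
  | nil => simp
  | cons q t ih =>
    rcases List.pairwise_cons.mp hs with ⟨hq, ht⟩
    by_cases h : q.1 = c
    · have := ih ht (fun p hp => h ▸ hq p hp)
      simp only [List.filter_cons, List.takeWhile_cons, List.dropWhile_cons, h]
      simpa using this
    · have hc : c < q.1 := lt_of_le_of_ne (hge q (List.mem_cons_self)) (fun e => h e.symm)
      have hnone : ∀ p ∈ t, ¬ (p.1 = c) := fun p hp e => by
        have := hq p hp; omega
      have hqc : (q.1 == c) = false := by simpa using h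
      have htf : t.filter (fun p => p.1 == c) = [] := by
        rw [List.filter_eq_nil_iff]
        intro p hp
        simpa using hnone p hp
      constructor
      · simp [List.filter_cons, List.takeWhile_cons, hqc, htf]
      · intro p hp
        rw [List.dropWhile_cons, hqc] at hp
        simp only [Bool.false_eq_true, if_false] at hp
        rcases List.mem_cons.mp hp with rfl | hp
        · exact hc
        · have := hq p hp; omega

-- core (A side): A's loop over the sorted distinct keys of a dict equals the run-by-run scan of the
-- key-sorted pair list, whenever the dict's stored sums are the per-key capability sums of the list
lemma pvLoop_eq (N : Nat) (l : List (Int × Int)) (hN : l.length ≤ N) (ks : List Int)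
    (d : PySem.Dict Int (List Int)) (dis res : Int)
    (hl : l.Pairwise (fun p q => p.1 ≤ q.1))
    (hks : ks.Pairwise (· < ·))
    (hmem : ∀ c, c ∈ ks ↔ ∃ p ∈ l, p.1 = c)
    (hd : ∀ c ∈ ks, (d.getD c []).sum = ((l.filter (fun p => p.1 == c)).map (·.2)).sum) :
    pvLoopA ks d dis res = pvRunScan l dis res := by
  induction N generalizing l ks dis res with
  | zero =>
    have : l = [] := List.length_eq_zero_iff.mp (Nat.le_zero.mp hN)
    subst this
    have : ks = [] := by
      cases ks with
      | nil => rfl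
      | cons k t => exact absurd ((hmem k).mp (List.mem_cons_self)) (by simp)
    subst this
    simp [pvLoopA, pvRunScan]
  | succ N ih =>
    cases l with
    | nil =>
      have : ks = [] := by
        cases ks with
        | nil => rfl
        | cons k t => exact absurd ((hmem k).mp (List.mem_cons_self)) (by simp)
      subst this
      simp [pvLoopA, pvRunScan]
    | cons p rest =>
      obtain ⟨c, v⟩ := p
      have hcmem : c ∈ ks := (hmem c).mpr ⟨(c, v), List.mem_cons_self, rfl⟩
      have hmin : ∀ q ∈ (c, v) :: rest, c ≤ q.1 := by
        intro q hq
        rcases List.mem_cons.mp hq with rfl | hq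
        · exact le_refl _
        · exact (List.pairwise_cons.mp hl).1 q hq
      cases ks with
      | nil => simp at hcmem
      | cons k0 ks' =>
        have hk0 : k0 = c := by
          obtain ⟨p0, hp0, hp0e⟩ := (hmem k0).mp (List.mem_cons_self)
          have h1 : c ≤ k0 := hp0e ▸ hmin p0 hp0
          rcases List.mem_cons.mp hcmem with rfl | hc'
          · rfl
          · have := (List.pairwise_cons.mp hks).1 c hc'
            omega
        subst k0
        have hrun := pvRun_filter c ((c, v) :: rest) hl hmin
        have hfl : ((c, v) :: rest).filter (fun p => p.1 == c) =
            (c, v) :: rest.takeWhile (fun p => p.1 == c) := by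
          rw [hrun.1]; simp [List.takeWhile_cons]
        have hdrop : ((c, v) :: rest).dropWhile (fun p => p.1 == c) =
            rest.dropWhile (fun p => p.1 == c) := by
          simp [List.dropWhile_cons]
        have hcap : (d.getD c []).sum = v + ((rest.takeWhile (fun p => p.1 == c)).map (·.2)).sum := by
          rw [hd c (List.mem_cons_self), hfl]; simp
        set rest' := rest.dropWhile (fun p => p.1 == c) with hrest'
        have hgt : ∀ q ∈ rest', c < q.1 := by
          intro q hq
          exact hrun.2 q (by rw [hdrop]; exact hq)
        have hsub : rest'.Sublist ((c, v) :: rest) :=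
          (List.dropWhile_sublist _).trans (List.sublist_cons_self _ _)
        have hsplit : (c, v) :: rest =
            ((c, v) :: rest).takeWhile (fun p => p.1 == c) ++ rest' := by
          rw [← hdrop, List.takeWhile_append_dropWhile]
        have htk : ∀ q ∈ ((c, v) :: rest).takeWhile (fun p => p.1 == c), q.1 = c := by
          intro q hq
          have := List.mem_takeWhile_imp hq
          simpa using this
        have hmem' : ∀ c', c' ∈ ks' ↔ ∃ p ∈ rest', p.1 = c' := by
          intro c'
          have hc'ne : c' ∈ ks' → c < c' := fun h => (List.pairwise_cons.mp hks).1 c' h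
          constructor
          · intro h
            obtain ⟨p0, hp0, hp0e⟩ := (hmem c').mp (List.mem_cons_of_mem _ h)
            refine ⟨p0, ?_, hp0e⟩
            rw [hsplit] at hp0
            rcases List.mem_append.mp hp0 with h1 | h1
            · exact absurd (htk p0 h1) (by have := hc'ne h; omega)
            · exact h1
          · intro ⟨p0, hp0, hp0e⟩
            have hp0l : p0 ∈ (c, v) :: rest := hsub.mem hp0
            have : p0.1 ∈ c :: ks' := (hmem p0.1).mpr ⟨p0, hp0l, rfl⟩
            rcases List.mem_cons.mp this with h1 | h1
            · exact absurd h1 (by have := hgt p0 hp0; omega)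
            · exact hp0e ▸ h1
        have hd' : ∀ c' ∈ ks', (d.getD c' []).sum =
            ((rest'.filter (fun p => p.1 == c')).map (·.2)).sum := by
          intro c' hc'
          have hcc' : c < c' := (List.pairwise_cons.mp hks).1 c' hc'
          rw [hd c' (List.mem_cons_of_mem _ hc')]
          congr 2
          conv_lhs => rw [hsplit]
          rw [List.filter_append]
          have : (((c, v) :: rest).takeWhile (fun p => p.1 == c)).filter (fun p => p.1 == c') = [] := by
            rw [List.filter_eq_nil_iff]
            intro q hq
            have := htk q hq
            simp [this]; omega
          rw [this, List.nil_append]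
        simp only [pvLoopA, pvRunScan]
        simp only [hcap]
        split
        · rfl
        · exact ih rest' (by
              have h1 : rest'.length ≤ rest.length := List.length_dropWhile_le _ _
              have h2 : rest.length + 1 ≤ N + 1 := hN
              omega)
            ks' _ _ (hl.sublist hsub) ((List.pairwise_cons.mp hks).2) hmem' hd'

-- assembly (A side): A's dict pipeline over any pair list ps equals the run scan of the sorted list
lemma pvMainA (ps : List (Int × Int)) (dis : Int) :
    pvLoopA
      (PySem.List.sorted
        ((ps.foldl (fun d p => d.insert p.1 (d.getD p.1 [] ++ [p.2])) PySem.Dict.empty).keys)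
        (fun x => x) false)
      (ps.foldl (fun d p => d.insert p.1 (d.getD p.1 [] ++ [p.2])) PySem.Dict.empty) dis 0 =
    pvRunScan (PySem.List.sorted ps (fun t => t.1) false) dis 0 := by
  set d := ps.foldl (fun d p => d.insert p.1 (d.getD p.1 [] ++ [p.2])) PySem.Dict.empty with hdict
  set l := PySem.List.sorted ps (fun t => t.1) false with hl
  have hlperm : l.Perm ps := PySem.List.sorted_perm ps _ false
  have hkeys : d.keys = PySem.Set.ofList (ps.map (·.1)) := by
    rw [hdict, PySem.Dict.keys_foldl_insert_key]
    simp [PySem.Set.update, PySem.Set.ofList_eq_foldl, PySem.Dict.keys_empty]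
  have hknd : d.keys.Nodup := hkeys ▸ PySem.Set.nodup_ofList _
  set ks := PySem.List.sorted d.keys (fun x => x) false with hks
  have hksperm : ks.Perm d.keys := PySem.List.sorted_perm _ _ _
  have hkslt : ks.Pairwise (· < ·) := by
    have h1 : ks.Pairwise (· ≤ ·) := by
      simpa using PySem.List.sorted_pairwise d.keys (fun x => x)
    have h2 : ks.Nodup := hksperm.nodup_iff.mpr hknd
    exact (h1.and h2).imp (fun h => lt_of_le_of_ne h.1 h.2)
  have hgetD : ∀ c, (d.getD c []) = (ps.filter (fun p => p.1 == c)).map (·.2) := by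
    intro c
    rw [hdict, pvBuild_getD]
    simp [PySem.Dict.getD_empty]
  refine pvLoop_eq l.length l le_rfl ks d dis 0 ?_ hkslt ?_ ?_
  · exact hl ▸ PySem.List.sorted_pairwise ps (fun t => t.1)
  · intro c
    rw [hks, PySem.List.mem_sorted, hkeys, PySem.Set.mem_ofList, List.mem_map]
    constructor
    · intro ⟨p, hp, hpe⟩
      exact ⟨p, hlperm.mem_iff.mpr hp, hpe⟩
    · intro ⟨p, hp, hpe⟩
      exact ⟨p, hlperm.mem_iff.mp hp, hpe⟩
  · intro c _
    rw [hgetD c]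
    exact (((hlperm.filter _).map _).sum_eq).symm

-- ===== B side: prefix sums, boundary list, and the bounds scan =====

-- prefix sums of capability and of money over the sorted pair list
def pvCap (l : List (Int × Int)) (j : Nat) : Int := ((l.take j).map (fun p => p.2)).sum
def pvMon (l : List (Int × Int)) (j : Nat) : Int := ((l.take j).map (fun p => p.1 * p.2)).sum

-- the boundary indices strictly above j, as naturals
def pvIB (costs : List Int) (j : Nat) : List Int :=
  ((List.range (costs.length + 1)).filter
    (fun i => decide (j < i) &&
      (i == costs.length || !(costs.getD i 0 == costs.getD (i - 1) 0)))).map Int.ofNat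

lemma pvBuildPQ_go (l : List (Int × Int)) (s t : Int) (P Q : List Int) :
    l.foldl (fun st p =>
        (st.1 + p.2, st.2.1 + p.1 * p.2, st.2.2.1 ++ [st.1 + p.2], st.2.2.2 ++ [st.2.1 + p.1 * p.2]))
      (s, t, P, Q) =
    (s + pvCap l l.length, t + pvMon l l.length,
      P ++ (List.range l.length).map (fun k => s + pvCap l (k + 1)),
      Q ++ (List.range l.length).map (fun k => t + pvMon l (k + 1))) := by
  induction l generalizing s t P Q with
  | nil => simp [pvCap, pvMon]
  | cons p rest ih =>
    simp only [List.foldl_cons, ih]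
    have hc : ∀ k, pvCap (p :: rest) (k + 1) = p.2 + pvCap rest k := by
      intro k; simp [pvCap]
    have hm : ∀ k, pvMon (p :: rest) (k + 1) = p.1 * p.2 + pvMon rest k := by
      intro k; simp [pvMon]
    refine Prod.ext ?_ (Prod.ext ?_ (Prod.ext ?_ ?_)) <;>
      simp only [List.length_cons, List.range_succ_eq_map, List.map_cons, List.map_map]
    · simp [hc]; ring
    · simp [hm]; ring
    · rw [List.append_assoc]
      congr 1
      simp only [List.singleton_append]
      congr 1
      · rw [hc 0]; simp [pvCap]
      · apply List.map_congr_left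
        intro k _
        simp only [Function.comp_apply, Nat.succ_eq_add_one, hc (k + 1)]
        ring
    · rw [List.append_assoc]
      congr 1
      simp only [List.singleton_append]
      congr 1
      · rw [hm 0]; simp [pvMon]
      · apply List.map_congr_left
        intro k _
        simp only [Function.comp_apply, Nat.succ_eq_add_one, hm (k + 1)]
        ring

lemma pvBuildPQ_spec (l : List (Int × Int)) :
    pvBuildPQ l = (pvCap l l.length, pvMon l l.length,
      (List.range (l.length + 1)).map (pvCap l),
      (List.range (l.length + 1)).map (pvMon l)) := by
  rw [pvBuildPQ, pvBuildPQ_go]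
  refine Prod.ext (by simp) (Prod.ext (by simp) (Prod.ext ?_ ?_)) <;>
    simp only [List.range_succ_eq_map, List.map_cons, List.map_map, List.singleton_append] <;>
    simp [pvCap, pvMon, Function.comp]

-- indexing a prefix array built as a map over range
lemma pvGet_map_range (f : Nat → Int) (m e : Nat) (he : e < m) :
    PySem.List.pyGetD ((List.range m).map f) (e : Int) 0 = f e := by
  rw [PySem.List.pyGetD_natCast]
  rw [List.getD_eq_getElem?_getD, List.getElem?_map, List.getElem?_range he]
  rfl

lemma pvMut_len (a : List Int) (n r : Int) : (pvMutA a n r).length = a.length := by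
  rw [pvMutA]
  generalize PySem.List.pyRange 0 n 1 = l
  induction l generalizing a with
  | nil => rfl
  | cons i t ih => simp [List.foldl_cons, ih, PySem.List.length_pySetD]

-- all first components equal c ⇒ the money sum is c times the capability sum
lemma pvMon_const (c : Int) (l : List (Int × Int)) (h : ∀ p ∈ l, p.1 = c) :
    (l.map (fun p => p.1 * p.2)).sum = c * (l.map (fun p => p.2)).sum := by
  induction l with
  | nil => simp
  | cons p rest ih =>
    have hp := h p List.mem_cons_self
    simp only [List.map_cons, List.sum_cons, ih (fun q hq => h q (List.mem_cons_of_mem _ hq)), hp]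
    ring

lemma pvTakeWhile_eq_take {α : Type} (p : α → Bool) (l : List α) :
    l.takeWhile p = l.take (l.takeWhile p).length := by
  induction l with
  | nil => rfl
  | cons x t ih =>
    by_cases h : p x
    · rw [List.takeWhile_cons_of_pos h, List.length_cons, List.take_succ_cons]
      exact congrArg (x :: ·) ih
    · rw [List.takeWhile_cons_of_neg h]
      rfl

lemma pvDropWhile_eq_drop {α : Type} (p : α → Bool) (l : List α) :
    l.dropWhile p = l.drop (l.takeWhile p).length := by
  induction l with
  | nil => rfl
  | cons x t ih =>
    by_cases h : p x
    · rw [List.dropWhile_cons_of_pos h, List.takeWhile_cons_of_pos h, List.length_cons,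
        List.drop_succ_cons]
      exact ih
    · rw [List.dropWhile_cons_of_neg h, List.takeWhile_cons_of_neg h]
      rfl

lemma pvDropWhile_head_false {α : Type} (p : α → Bool) (l : List α) (y : α) (ys : List α)
    (h : l.dropWhile p = y :: ys) : p y = false := by
  induction l with
  | nil => simp at h
  | cons x t ih =>
    by_cases hx : p x
    · rw [List.dropWhile_cons_of_pos hx] at h
      exact ih h
    · rw [List.dropWhile_cons_of_neg hx] at h
      injection h with h1 _
      exact h1 ▸ Bool.eq_false_iff.mpr hx

lemma pvIB_nil (costs : List Int) : pvIB costs costs.length = [] := by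
  rw [pvIB]
  have h : (List.range (costs.length + 1)).filter
      (fun i => decide (costs.length < i) &&
        (i == costs.length || !(costs.getD i 0 == costs.getD (i - 1) 0))) = [] := by
    apply List.filter_eq_nil_iff.mpr
    intro i hi
    rw [List.mem_range] at hi
    simp [show ¬ costs.length < i by omega]
  rw [h]
  rfl

lemma pvIB_step (costs : List Int) (j e1 : Nat) (hj : j < e1) (he1 : e1 ≤ costs.length)
    (hmid : ∀ i, j < i → i < e1 →
      ((i == costs.length || !(costs.getD i 0 == costs.getD (i - 1) 0))) = false)
    (hB : ((e1 == costs.length || !(costs.getD e1 0 == costs.getD (e1 - 1) 0))) = true) :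
    pvIB costs j = (e1 : Int) :: pvIB costs e1 := by
  rw [pvIB, pvIB]
  have hsplit : List.range (costs.length + 1) =
      List.range (e1 + 1) ++ (List.range (costs.length - e1)).map (fun t => (e1 + 1) + t) := by
    rw [← List.range_add]
    congr 1
    omega
  rw [hsplit, List.filter_append, List.filter_append]
  have h1 : (List.range (e1 + 1)).filter
      (fun i => decide (j < i) && (i == costs.length || !(costs.getD i 0 == costs.getD (i - 1) 0)))
      = [e1] := by
    rw [List.range_succ, List.filter_append]
    have ha : (List.range e1).filter
        (fun i => decide (j < i) && (i == costs.length || !(costs.getD i 0 == costs.getD (i - 1) 0)))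
        = [] := by
      apply List.filter_eq_nil_iff.mpr
      intro i hi
      rw [List.mem_range] at hi
      by_cases hji : j < i
      · rw [hmid i hji hi]
        simp
      · simp [hji]
    rw [ha, List.nil_append]
    have hp : (decide (j < e1) &&
        (e1 == costs.length || !(costs.getD e1 0 == costs.getD (e1 - 1) 0))) = true := by
      rw [hB]
      simp [hj]
    simp only [List.filter_cons, List.filter_nil]
    rw [if_pos hp]
  have h2 : (List.range (e1 + 1)).filter
      (fun i => decide (e1 < i) && (i == costs.length || !(costs.getD i 0 == costs.getD (i - 1) 0)))
      = [] := by
    apply List.filter_eq_nil_iff.mpr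
    intro i hi
    rw [List.mem_range] at hi
    simp [show ¬ e1 < i by omega]
  have h3 : ((List.range (costs.length - e1)).map (fun t => (e1 + 1) + t)).filter
        (fun i => decide (j < i) && (i == costs.length || !(costs.getD i 0 == costs.getD (i - 1) 0)))
      = ((List.range (costs.length - e1)).map (fun t => (e1 + 1) + t)).filter
        (fun i => decide (e1 < i) && (i == costs.length || !(costs.getD i 0 == costs.getD (i - 1) 0))) := by
    apply List.filter_congr
    intro i hi
    rw [List.mem_map] at hi
    obtain ⟨t, _, rfl⟩ := hi
    simp only [show j < e1 + 1 + t by omega, show e1 < e1 + 1 + t by omega, decide_true,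
      Bool.true_and]
  rw [h1, h2, h3]
  simp

-- core (B side): the bounds scan from any position j equals the run scan of the suffix
lemma pvScan_eq (N : Nat) (l : List (Int × Int)) (need : Int) (j : Nat)
    (hj : j ≤ l.length) (hN : l.length - j ≤ N) :
    pvLoopB (pvIB (l.map Prod.fst) j) (j : Int) (l.map Prod.fst)
        ((List.range (l.length + 1)).map (pvCap l)) ((List.range (l.length + 1)).map (pvMon l)) need
      = pvRunScan (l.drop j) (need - pvCap l j) (pvMon l j) := by
  induction N generalizing j need with
  | zero =>
    have hj' : j = l.length := by omega
    subst hj'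
    have h0 : pvIB (l.map Prod.fst) l.length = [] := by
      have h := pvIB_nil (l.map Prod.fst)
      rwa [List.length_map] at h
    rw [List.drop_length, h0]
    simp [pvLoopB, pvRunScan]
  | succ N ih =>
    by_cases hje : j = l.length
    · subst hje
      have h0 : pvIB (l.map Prod.fst) l.length = [] := by
        have h := pvIB_nil (l.map Prod.fst)
        rwa [List.length_map] at h
      rw [List.drop_length, h0]
      simp [pvLoopB, pvRunScan]
    · have hjl : j < l.length := lt_of_le_of_ne hj hje
      set x := l[j]'hjl with hx
      obtain ⟨c, v⟩ := x
      have hdropj : l.drop j = (c, v) :: l.drop (j + 1) := by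
        rw [List.drop_eq_getElem_cons hjl, ← hx]
      set rest := l.drop (j + 1) with hrest
      set k := ((l.drop j).takeWhile (fun t : Int × Int => t.1 == c)).length with hk
      have htwcons : (l.drop j).takeWhile (fun t : Int × Int => t.1 == c)
          = (c, v) :: rest.takeWhile (fun t : Int × Int => t.1 == c) := by
        rw [hdropj, List.takeWhile_cons_of_pos (by simp)]
      have hk1 : 1 ≤ k := by rw [hk, htwcons]; simp
      have hkle : k ≤ l.length - j := by
        have h := (List.takeWhile_sublist (p := fun t : Int × Int => t.1 == c)
          (l := l.drop j)).length_le
        rw [List.length_drop] at h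
        omega
      have he1 : j + k ≤ l.length := by omega
      have htake : (l.drop j).takeWhile (fun t : Int × Int => t.1 == c)
          = (l.drop j).take k := pvTakeWhile_eq_take _ _
      have hdropw : (l.drop j).dropWhile (fun t : Int × Int => t.1 == c) = l.drop (j + k) := by
        rw [pvDropWhile_eq_drop, ← hk, List.drop_drop]
      have hconst : ∀ i (hi : i < l.length), j ≤ i → i < j + k → (l[i]'hi).1 = c := by
        intro i hi hji hie
        have h1 : i - j < ((l.drop j).take k).length := by
          rw [List.length_take, List.length_drop]
          omega
        have h2 : ((l.drop j).take k)[i - j]'h1 = l[i]'hi := by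
          rw [List.getElem_take, List.getElem_drop]
          congr 1
          omega
        have h3 : ((l.drop j).take k)[i - j]'h1 ∈
            (l.drop j).takeWhile (fun t : Int × Int => t.1 == c) := by
          rw [htake]
          exact List.getElem_mem _
        have h4 := List.mem_takeWhile_imp h3
        rw [h2] at h4
        simpa using h4
      have hcost : ∀ i (hi : i < l.length), (l.map Prod.fst).getD i 0 = (l[i]'hi).1 := by
        intro i hi
        rw [List.getD_eq_getElem?_getD, List.getElem?_map, List.getElem?_eq_getElem hi]
        rfl
      have hmid : ∀ i, j < i → i < j + k →
          ((i == (l.map Prod.fst).length ||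
            !((l.map Prod.fst).getD i 0 == (l.map Prod.fst).getD (i - 1) 0))) = false := by
        intro i h1 h2
        have him : i < l.length := by omega
        have him1 : i - 1 < l.length := by omega
        rw [List.length_map]
        have e1i : (l.map Prod.fst).getD i 0 = c := by
          rw [hcost i him]
          exact hconst i him (by omega) h2
        have e2i : (l.map Prod.fst).getD (i - 1) 0 = c := by
          rw [hcost (i - 1) him1]
          exact hconst (i - 1) him1 (by omega) (by omega)
        rw [e1i, e2i]
        simp [show i ≠ l.length by omega]
      have hBe1 : (((j + k) == (l.map Prod.fst).length ||
          !((l.map Prod.fst).getD (j + k) 0 == (l.map Prod.fst).getD (j + k - 1) 0))) = true := by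
        rw [List.length_map]
        by_cases he : j + k = l.length
        · simp [he]
        · have he1m : j + k < l.length := by omega
          have hdnil : l.drop (j + k) = l[j + k]'he1m :: l.drop (j + k + 1) :=
            List.drop_eq_getElem_cons he1m
          have hfalse : ((l[j + k]'he1m).1 == c) = false :=
            pvDropWhile_head_false _ (l.drop j) _ _ (by rw [hdropw, hdnil])
          have hne : (l[j + k]'he1m).1 ≠ c := by simpa using hfalse
          have h1 : (l.map Prod.fst).getD (j + k) 0 = (l[j + k]'he1m).1 := hcost (j + k) he1m
          have h2 : (l.map Prod.fst).getD (j + k - 1) 0 = c := by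
            rw [hcost (j + k - 1) (by omega)]
            exact hconst (j + k - 1) (by omega) (by omega) (by omega)
          rw [h1, h2]
          simp [hne]
      have hIB : pvIB (l.map Prod.fst) j = ((j + k : Nat) : Int) :: pvIB (l.map Prod.fst) (j + k) := by
        apply pvIB_step
        · omega
        · rw [List.length_map]; exact he1
        · exact hmid
        · exact hBe1
      have hcap : pvCap l (j + k) = pvCap l j +
          (((l.drop j).takeWhile (fun t : Int × Int => t.1 == c)).map (fun p => p.2)).sum := by
        rw [pvCap, pvCap, List.take_add, List.map_append, List.sum_append, htake]
      have hmon : pvMon l (j + k) = pvMon l j +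
          c * (((l.drop j).takeWhile (fun t : Int × Int => t.1 == c)).map (fun p => p.2)).sum := by
        rw [pvMon, pvMon, List.take_add, List.map_append, List.sum_append, ← htake]
        congr 1
        apply pvMon_const
        intro p hp
        simpa using List.mem_takeWhile_imp hp
      have hcapR : v + ((rest.takeWhile (fun t : Int × Int => t.1 == c)).map (fun p => p.2)).sum
          = pvCap l (j + k) - pvCap l j := by
        rw [hcap, htwcons]
        simp
      have hPe1 : PySem.List.pyGetD ((List.range (l.length + 1)).map (pvCap l)) ((j + k : Nat) : Int) 0
          = pvCap l (j + k) := pvGet_map_range _ _ _ (by omega)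
      have hPj : PySem.List.pyGetD ((List.range (l.length + 1)).map (pvCap l)) ((j : Nat) : Int) 0
          = pvCap l j := pvGet_map_range _ _ _ (by omega)
      have hQj : PySem.List.pyGetD ((List.range (l.length + 1)).map (pvMon l)) ((j : Nat) : Int) 0
          = pvMon l j := pvGet_map_range _ _ _ (by omega)
      have hcostj : PySem.List.pyGetD (l.map Prod.fst) ((j : Nat) : Int) 0 = c := by
        rw [PySem.List.pyGetD_natCast, hcost j hjl, ← hx]
      have hRHS : pvRunScan (l.drop j) (need - pvCap l j) (pvMon l j) =
          if pvCap l (j + k) ≥ need then some (pvMon l j + c * (need - pvCap l j))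
          else pvRunScan (l.drop (j + k)) (need - pvCap l (j + k)) (pvMon l (j + k)) := by
        rw [hdropj]
        simp only [pvRunScan]
        rw [hcapR]
        have hdw : rest.dropWhile (fun t : Int × Int => t.1 == c) = l.drop (j + k) := by
          rw [← hdropw, hdropj, List.dropWhile_cons_of_pos (by simp)]
        rw [hdw]
        by_cases hge : pvCap l (j + k) - pvCap l j ≥ need - pvCap l j
        · rw [if_pos hge, if_pos (by omega)]
        · rw [if_neg hge, if_neg (by omega)]
          congr 1
          · ring
          · rw [hmon, hcap]
            ring
      rw [hIB]
      simp only [pvLoopB]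
      rw [hPe1, hPj, hQj, hcostj, hRHS]
      by_cases hge : pvCap l (j + k) ≥ need
      · rw [if_pos hge, if_pos hge]
      · rw [if_neg hge, if_neg hge]
        exact ih need (j + k) he1 (by omega)

-- zip of the two truncations = the indexed pair list A builds
lemma pvZip_eq_map_range (xs ys : List Int) (m : Nat) (hx : m ≤ xs.length) (hy : m ≤ ys.length) :
    (xs.take m).zip (ys.take m) = (List.range m).map (fun k => (xs.getD k 0, ys.getD k 0)) := by
  apply List.ext_getElem
  · simp [hx, hy]
  · intro i h1 h2
    have him : i < m := by simpa using h2
    have hix : i < xs.length := lt_of_lt_of_le him hx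
    have hiy : i < ys.length := lt_of_lt_of_le him hy
    simp [List.getElem_zip, List.getElem_take, List.getD_eq_getElem?_getD,
      List.getElem?_eq_getElem, hix, hiy, him]

-- the port's bounds list is the abstract boundary list from position 0
lemma pvBounds_eq_IB (costs : List Int) :
    pvBoundsB costs (costs.length : Int) = pvIB costs 0 := by
  rw [pvBoundsB, pvIB, PySem.List.pyRange_one]
  have h1 : ((costs.length : Int) + 1 - 1).toNat = costs.length := by omega
  rw [h1, List.filter_map, List.range_succ_eq_map]
  rw [List.filter_cons_of_neg (by simp)]
  rw [List.filter_map, List.map_map]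
  congr 1
  · funext k
    simp only [Function.comp_apply, Int.ofNat_eq_natCast, Nat.succ_eq_add_one]
    push_cast
    ring
  · apply List.filter_congr
    intro k _
    simp only [Function.comp_apply, Nat.succ_eq_add_one]
    have hcast : (1 : Int) + (k : Int) = ((k + 1 : Nat) : Int) := by push_cast; ring
    have hcast2 : ((k + 1 : Nat) : Int) - 1 = (k : Nat) := by push_cast; ring
    rw [hcast, hcast2, PySem.List.pyGetD_natCast, PySem.List.pyGetD_natCast]
    have hbeq : (((k + 1 : Nat) : Int) == (costs.length : Int)) = ((k + 1) == costs.length) := by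
      rw [Bool.eq_iff_iff]
      simp only [beq_iff_eq]
      omega
    rw [hbeq]
    simp

-- B's staged pipeline on any pair list L equals the run scan of L
lemma pvBside (L : List (Int × Int)) (dis : Int) :
    pvLoopB (pvBoundsB (L.map (·.1)) ((L.length : Nat) : Int)) 0 (L.map (·.1))
      (pvBuildPQ L).2.2.1 (pvBuildPQ L).2.2.2 dis = pvRunScan L dis 0 := by
  have hfst : L.map (·.1) = L.map Prod.fst := rfl
  have hlen : ((L.length : Nat) : Int) = (((L.map Prod.fst).length : Nat) : Int) := by
    rw [List.length_map]
  rw [hfst, hlen, pvBounds_eq_IB, pvBuildPQ_spec]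
  show pvLoopB (pvIB (L.map Prod.fst) 0) 0 (L.map Prod.fst)
      ((List.range (L.length + 1)).map (pvCap L)) ((List.range (L.length + 1)).map (pvMon L)) dis
    = pvRunScan L dis 0
  have h := pvScan_eq L.length L dis 0 (by omega) (by omega)
  simp only [Nat.cast_zero, List.drop_zero, pvCap, pvMon, List.take_zero, List.map_nil,
    List.sum_nil, sub_zero] at h
  exact h

-- ===== VERDICT (by name: the statement is the Claim_ definition above) =====
theorem write_essays_spec : Claim_equal_write_essays := by
  intro a b n r avg _ hpre
  unfold Spec_write_essays write_essays write_essays_alt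
  by_cases hg : a.sum ≥ avg * n
  · rw [if_pos hg, if_pos hg]
  · rw [if_neg hg, if_neg hg]
    show pvLoopA
        (PySem.List.sorted (pvDictA (pvMutA a n r) b n).keys (fun x => x) false)
        (pvDictA (pvMutA a n r) b n) (avg * n - a.sum) 0
      = pvLoopB (pvBoundsB ((pvPairsB (pvMutB a n r) b n).map (·.1)) n) 0
          ((pvPairsB (pvMutB a n r) b n).map (·.1))
          (pvBuildPQ (pvPairsB (pvMutB a n r) b n)).2.2.1
          (pvBuildPQ (pvPairsB (pvMutB a n r) b n)).2.2.2 (avg * n - a.sum)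
    by_cases hn : n ≤ 0
    · have hr0 : PySem.List.pyRange 0 n 1 = [] := PySem.List.pyRange_one_eq_nil (by omega)
      have hdict : pvDictA (pvMutA a n r) b n = PySem.Dict.empty := by
        rw [pvDictA, hr0]
        rfl
      have hs0 : PySem.List.sorted ([] : List Int) (fun x => x) false = [] :=
        (PySem.List.sorted_perm [] _ false).eq_nil
      have hb0 : pvBoundsB ((pvPairsB (pvMutB a n r) b n).map (·.1)) n = [] := by
        rw [pvBoundsB, PySem.List.pyRange_one_eq_nil (by omega)]
        rfl
      rw [hdict, PySem.Dict.keys_empty, hs0, hb0]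
      simp [pvLoopA, pvLoopB]
    · push_neg at hn
      rcases hpre with h | ⟨hna, hnb⟩
      · exact absurd h hg
      have hmm : pvMutA a n r = pvMutB a n r := rfl
      have hla : (pvMutB a n r).length = a.length := pvMut_len a n r
      set ps := (PySem.List.pyRange 0 n 1).map
        (fun i => (PySem.List.pyGetD b i 0, PySem.List.pyGetD (pvMutB a n r) i 0)) with hps
      have hAside : pvDictA (pvMutB a n r) b n =
          ps.foldl (fun d p => d.insert p.1 (d.getD p.1 [] ++ [p.2])) PySem.Dict.empty := by
        rw [pvDictA, hps]
        exact (List.foldl_map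
          (f := fun i => (PySem.List.pyGetD b i 0, PySem.List.pyGetD (pvMutB a n r) i 0))
          (g := fun (d : PySem.Dict Int (List Int)) (p : Int × Int) =>
            d.insert p.1 (d.getD p.1 [] ++ [p.2]))
          (l := PySem.List.pyRange 0 n 1) (init := PySem.Dict.empty)).symm
      have hpairs : pvPairsB (pvMutB a n r) b n = PySem.List.sorted ps (fun t => t.1) false := by
        rw [pvPairsB]
        congr 1
        rw [PySem.List.slice_to b (by omega), PySem.List.slice_to (pvMutB a n r) (by omega)]
        rw [pvZip_eq_map_range b (pvMutB a n r) n.toNat (by omega) (by omega)]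
        rw [hps, show n = ((n.toNat : Nat) : Int) by omega, PySem.List.pyRange_zero_nat,
          List.map_map]
        apply List.map_congr_left
        intro k _
        simp
      rw [hmm, hAside, pvMainA ps (avg * n - a.sum), hpairs]
      set L := PySem.List.sorted ps (fun t => t.1) false with hL
      have hlen2 : n = ((L.length : Nat) : Int) := by
        rw [hL, PySem.List.length_sorted, hps, List.length_map,
          PySem.List.length_pyRange_one]
        omega
      rw [hlen2]
      exact (pvBside L _).symm
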